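-- pv_equiv track=rewrite | github.com/leobeuque/Projet-d-ordonnancement | Algorithme métaheuristique tabou ordonnancement version finale.py | fbis
-- ===== SOURCE A (Python) =====
-- def fbis(s): # Fonction d'évaluation retenue : Prend également en compte la position des cases vides (valeur plus faible pour une case vide à droite), en attribuant + d'importance malgré tout au nombre de cases vides
--     SommeCasesVides = 0
--     for k in range(len(s)): #on parcourt toute les cases de la solution
--         sommePotentielle = 0
--         for l in range (len(s[k])):
--             if s[k][l] != (-1,-1): #on ne prend pas en compte les cases vides situées aux extrémités droites, car la compétence n'attend alors plus personne
--                 SommeCasesVides += sommePotentielle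
--                 sommePotentielle = 0
--             else:
--                 sommePotentielle += len(s[k])*len(s) + (len(s[k])-(l+1)) #-> On donne une grande priorité à l'absence de cases vides et une moins grane priorité à leur position
--     return SommeCasesVides
-- ===== SOURCE B (Python) =====
-- def fbis(s):  # trim the trailing empty run, then sum each remaining empty cell's weight
--     n = len(s)
--     total = 0
--     for row in s:
--         m = len(row)
--         t = m
--         while t and row[t - 1] == (-1, -1):
--             t -= 1
--         for l in range(t):
--             if row[l] == (-1, -1):
--                 total += m * n + m - l - 1
--     return total
-- ===== Notes on version B (the rewrite author's own statement) =====
-- stated objective: simpler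
-- what changed: Replaced A's pending-accumulator-and-flush inner loop (carrying sommePotentielle and flushing it at each non-empty cell) by first trimming the trailing run of empty cells off the row and then directly summing the weight of every empty cell that remains.
import Mathlib
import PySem

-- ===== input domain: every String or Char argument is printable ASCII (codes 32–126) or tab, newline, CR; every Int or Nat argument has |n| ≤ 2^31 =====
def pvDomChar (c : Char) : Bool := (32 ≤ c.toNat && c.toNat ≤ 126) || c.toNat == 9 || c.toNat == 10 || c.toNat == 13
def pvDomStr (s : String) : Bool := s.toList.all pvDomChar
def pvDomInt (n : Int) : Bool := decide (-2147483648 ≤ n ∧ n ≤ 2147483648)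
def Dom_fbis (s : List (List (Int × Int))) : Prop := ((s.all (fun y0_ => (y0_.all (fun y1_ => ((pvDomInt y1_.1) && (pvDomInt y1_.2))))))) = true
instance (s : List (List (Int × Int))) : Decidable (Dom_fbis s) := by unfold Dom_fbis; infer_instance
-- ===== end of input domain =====

-- B replaces A's pending-accumulator-and-flush scan by trimming the trailing empty run
-- and summing the weights of the remaining empty cells directly (objective: simpler).

-- ===== PORT A =====
-- inner-loop body of A: state (l, SommeCasesVides, sommePotentielle)
def stepA (m n : Int) (st : Int × Int × Int) (c : Int × Int) : Int × Int × Int :=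
  if c ≠ (-1, -1) then (st.1 + 1, st.2.1 + st.2.2, 0)
  else (st.1 + 1, st.2.1, st.2.2 + (m * n + (m - (st.1 + 1))))

def fbis (s : List (List (Int × Int))) : Int :=
  s.foldl
    (fun somme row =>
      (row.foldl (stepA (row.length : Int) (s.length : Int)) (0, somme, 0)).2.1)
    0

-- ===== PORT B =====
-- the while loop of B: drop the trailing run of empty cells
def trimEmpty (row : List (Int × Int)) : List (Int × Int) :=
  (row.reverse.dropWhile (· == (-1, -1))).reverse

-- inner-loop body of B: state (l, total)
def stepB (m n : Int) (st : Int × Int) (c : Int × Int) : Int × Int :=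
  if c == (-1, -1) then (st.1 + 1, st.2 + (m * n + m - st.1 - 1))
  else (st.1 + 1, st.2)

def fbis_alt (s : List (List (Int × Int))) : Int :=
  s.foldl
    (fun total row =>
      ((trimEmpty row).foldl (stepB (row.length : Int) (s.length : Int)) (0, total)).2)
    0

-- ===== PRECONDITION & SPEC =====
def Spec_fbis (s : List (List (Int × Int))) (out : Int) : Prop := out = fbis_alt s
instance (s : List (List (Int × Int))) (out : Int) : Decidable (Spec_fbis s out) := by unfold Spec_fbis; infer_instance

-- ===== CLAIM (what is proved, stated in full; the proofs are below) =====
def Claim_equal_fbis : Prop := ∀ (s : List (List (Int × Int))), Dom_fbis s → Spec_fbis s (fbis s)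

-- ===== LEMMAS AND PROOFS =====

-- weighted sum of empty cells over the whole row / over the trimmed row
def sumFull (m n : Int) (row : List (Int × Int)) : Int :=
  (row.foldl (stepB m n) (0, 0)).2

def sumTrim (m n : Int) (row : List (Int × Int)) : Int :=
  ((trimEmpty row).foldl (stepB m n) (0, 0)).2

theorem stepB_counter (m n : Int) (row : List (Int × Int)) :
    ∀ st : Int × Int, (row.foldl (stepB m n) st).1 = st.1 + row.length := by
  induction row with
  | nil => intro st; simp
  | cons c r ih =>
    intro st
    simp only [List.foldl_cons, ih, List.length_cons]
    simp [stepB]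
    split_ifs <;> push_cast <;> ring

theorem stepB_add (m n : Int) (row : List (Int × Int)) :
    ∀ (l a : Int), (row.foldl (stepB m n) (l, a)).2 = a + (row.foldl (stepB m n) (l, 0)).2 := by
  induction row with
  | nil => intro l a; simp
  | cons c r ih =>
    intro l a
    simp only [List.foldl_cons, stepB]
    split_ifs with h
    · rw [ih (l + 1) (a + (m * n + m - l - 1)), ih (l + 1) (0 + (m * n + m - l - 1))]
      ring
    · exact ih (l + 1) a

theorem trimEmpty_append_ne (r : List (Int × Int)) (c : Int × Int) (h : c ≠ (-1, -1)) :
    trimEmpty (r ++ [c]) = r ++ [c] := by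
  simp [trimEmpty, h]

theorem trimEmpty_append_eq (r : List (Int × Int)) :
    trimEmpty (r ++ [(-1, -1)]) = trimEmpty r := by
  simp [trimEmpty]

theorem main_inv (m n : Int) (row : List (Int × Int)) :
    ∀ a : Int, row.foldl (stepA m n) (0, a, 0) =
      ((row.length : Int), a + sumTrim m n row, sumFull m n row - sumTrim m n row) := by
  induction row using List.reverseRecOn with
  | nil => intro a; simp [sumTrim, sumFull, trimEmpty]
  | append_singleton r c ih =>
    intro a
    rw [List.foldl_append, ih a]
    by_cases hc : c = (-1, -1)
    · subst hc
      have hBin : sumTrim m n (r ++ [(-1, -1)]) = sumTrim m n r := by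
        simp [sumTrim, trimEmpty_append_eq]
      have hFull : sumFull m n (r ++ [(-1, -1)]) =
          sumFull m n r + (m * n + m - (r.length : Int) - 1) := by
        have h1 := stepB_counter m n r ((0 : Int), (0 : Int))
        simp only [sumFull, List.foldl_append, List.foldl_cons, List.foldl_nil, stepB]
        simp [h1]
      simp only [List.foldl_cons, List.foldl_nil, stepA, hBin, hFull]
      simp
      ring
    · have hBin : sumTrim m n (r ++ [c]) = sumFull m n r := by
        have hb : (c == (-1, -1)) = false := by simp [hc]
        simp only [sumTrim, trimEmpty_append_ne r c hc, List.foldl_append,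
          List.foldl_cons, List.foldl_nil, stepB, hb]
        simp [sumFull]
      have hFull : sumFull m n (r ++ [c]) = sumFull m n r := by
        have hb : (c == (-1, -1)) = false := by simp [hc]
        simp only [sumFull, List.foldl_append, List.foldl_cons, List.foldl_nil, stepB, hb]
        simp
      simp only [List.foldl_cons, List.foldl_nil, stepA, hBin, hFull]
      simp [hc]

-- ===== VERDICT (by name: the statement is the Claim_ definition above) =====
theorem fbis_spec : Claim_equal_fbis := by
  intro s _
  unfold Spec_fbis fbis fbis_alt
  have hstep : (fun (somme : Int) (row : List (Int × Int)) =>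
        (row.foldl (stepA (row.length : Int) (s.length : Int)) (0, somme, 0)).2.1)
      = (fun (total : Int) (row : List (Int × Int)) =>
        ((trimEmpty row).foldl (stepB (row.length : Int) (s.length : Int)) (0, total)).2) := by
    funext a row
    rw [main_inv, stepB_add]
    rfl
  rw [hstep]
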